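-- pv_equiv track=rewrite | github.com/keithwissing/adventofcode | 2017/day21.py | break_into_subimages
-- ===== SOURCE A (Python) =====
-- def break_into_subimages(image):
--     subimages = []
--     subsize = 2 if len(image[0]) % 2 == 0 else 3
--     for row in range(0, len(image), subsize):
--         for col in range(0, len(image), subsize):
--             subimage = [[image[srow][scol] for scol in range(col, col+subsize)] for srow in range(row, row+subsize)]
--             subimages.append(subimage)
--     return subimages
-- ===== SOURCE B (Python) =====
-- def break_into_subimages(image):
--     subsize = 2 if len(image[0]) % 2 == 0 else 3
--     chunked = [[[row[c + o] for o in range(subsize)] for c in range(0, len(image), subsize)] for row in image]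
--     out = []
--     for r in range(0, len(image), subsize):
--         band = [chunked[r + t] for t in range(subsize)]
--         for k in range(len(band[0])):
--             out.append([br[k] for br in band])
--     return out
-- ===== Notes on version B (the rewrite author's own statement) =====
-- stated objective: alternative
-- what changed: Replaces A's direct four-index block-by-block scan by two differently-shaped passes: first chunk every row into subsize-wide slices, then assemble blocks by slicing row-bands of the chunked table and transposing each band by chunk index.
import Mathlib
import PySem

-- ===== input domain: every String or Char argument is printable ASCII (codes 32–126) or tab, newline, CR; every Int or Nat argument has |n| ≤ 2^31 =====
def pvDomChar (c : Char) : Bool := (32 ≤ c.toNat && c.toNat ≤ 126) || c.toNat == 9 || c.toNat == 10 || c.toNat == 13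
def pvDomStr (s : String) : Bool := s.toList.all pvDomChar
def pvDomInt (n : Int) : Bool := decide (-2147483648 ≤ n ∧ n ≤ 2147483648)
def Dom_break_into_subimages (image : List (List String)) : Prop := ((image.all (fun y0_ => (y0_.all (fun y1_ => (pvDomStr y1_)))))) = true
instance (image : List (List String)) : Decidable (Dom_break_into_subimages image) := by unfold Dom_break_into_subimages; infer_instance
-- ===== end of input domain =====

-- B replaces A's direct four-index block scan by a chunk-rows pass followed by a band-slicing/transposing
-- assembly pass (alternative decomposition, same cost).


-- ===== PORT A =====
-- literal port of A: subsize from len(image[0]) (pyGetD is total stand-in for image[0]; in range under Pre_),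
-- then the block-by-block scan with two stepped ranges and a two-level indexed comprehension.
def break_into_subimages (image : List (List String)) : List (List (List String)) :=
  let n : Int := image.length
  let subsize : Int := if PySem.Int.mod ((PySem.List.pyGetD image 0 []).length : Int) 2 = 0 then 2 else 3
  (PySem.List.pyRange 0 n subsize).foldl (fun subimages row =>
    (PySem.List.pyRange 0 n subsize).foldl (fun subimages col =>
      subimages ++ [(PySem.List.pyRange row (row + subsize) 1).map (fun srow =>
        (PySem.List.pyRange col (col + subsize) 1).map (fun scol =>
          PySem.List.pyGetD (PySem.List.pyGetD image srow []) scol ""))]) subimages) []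

-- ===== PORT B =====
-- literal port of B: chunk every row into subsize-wide chunks, then take row-bands of the chunked table
-- and emit, per chunk index k, the column [br[k] for br in band].
def break_into_subimages_alt (image : List (List String)) : List (List (List String)) :=
  let n : Int := image.length
  let subsize : Int := if PySem.Int.mod ((PySem.List.pyGetD image 0 []).length : Int) 2 = 0 then 2 else 3
  let chunked : List (List (List String)) := image.map (fun row =>
    (PySem.List.pyRange 0 n subsize).map (fun c =>
      (PySem.List.pyRange 0 subsize 1).map (fun o => PySem.List.pyGetD row (c + o) "")))
  (PySem.List.pyRange 0 n subsize).foldl (fun out r =>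
    let band := (PySem.List.pyRange 0 subsize 1).map (fun t => PySem.List.pyGetD chunked (r + t) [])
    (PySem.List.pyRange 0 ((PySem.List.pyGetD band 0 []).length : Int) 1).foldl (fun out k =>
      out ++ [band.map (fun br => PySem.List.pyGetD br k [])]) out) []

-- ===== PRECONDITION & SPEC =====
-- Pre_ is exactly where the Python A returns normally: a nonempty image whose height is a multiple of the
-- subsize chosen from the first row's width, every row at least as long as the image is tall
-- (on all other inputs A raises IndexError).
def Pre_break_into_subimages (image : List (List String)) : Prop :=
  image ≠ [] ∧
  image.length % (if (image.headD []).length % 2 = 0 then 2 else 3) = 0 ∧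
  ∀ row ∈ image, image.length ≤ row.length
instance (image : List (List String)) : Decidable (Pre_break_into_subimages image) := by unfold Pre_break_into_subimages; infer_instance

def pvWitness_break_into_subimages : List (List String) :=
  [["a","b"],["c","d"]]

def Spec_break_into_subimages (image : List (List String)) (out : List (List (List String))) : Prop := out = break_into_subimages_alt image
instance (image : List (List String)) (out : List (List (List String))) : Decidable (Spec_break_into_subimages image out) := by unfold Spec_break_into_subimages; infer_instance

-- ===== CLAIM (what is proved, stated in full; the proofs are below) =====
def Claim_equal_break_into_subimages : Prop := ∀ (image : List (List String)), Dom_break_into_subimages image → Pre_break_into_subimages image → Spec_break_into_subimages image (break_into_subimages image)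

-- ===== LEMMAS AND PROOFS =====

-- range(0, n, s) with s ∣ n enumerates the chunk starts i*s, i < n/s
lemma pv_range_step (n sN : Nat) (h : 0 < sN) (hd : sN ∣ n) :
    PySem.List.pyRange 0 (n : Int) (sN : Int) =
      (List.range (n / sN)).map (fun i => ((i * sN : Nat) : Int)) := by
  rw [PySem.List.pyRange_of_pos 0 (n : Int) (by exact_mod_cast h)]
  have hcnt : (if (0:Int) < n then (((n : Int) - 0 + sN - 1) / sN).toNat else 0) = n / sN := by
    split_ifs with hn
    · have he : ((n : Int) - 0 + sN - 1) = ((n + sN - 1 : Nat) : Int) := by omega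
      rw [he, ← Int.natCast_ediv]
      have hq : (n + sN - 1) / sN = n / sN := by
        obtain ⟨m, rfl⟩ := hd
        have he2 : sN * m + sN - 1 = sN * m + (sN - 1) := by omega
        rw [he2, Nat.mul_add_div h, Nat.div_eq_of_lt (by omega), Nat.mul_div_cancel_left _ h]
        omega
      rw [hq]; exact Int.toNat_natCast _
    · have hn0 : n = 0 := by omega
      simp [hn0]
  rw [hcnt]
  exact List.map_congr_left (fun k hk => by push_cast; ring)

-- shifting range(0, s) by c equals range(c, c+s) under the row lookup
lemma pv_chunk_shift (row : List String) (c sN : Nat) :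
    (PySem.List.pyRange 0 (sN : Int) 1).map (fun o => PySem.List.pyGetD row (((c : Nat) : Int) + o) "") =
      (PySem.List.pyRange ((c : Nat) : Int) (((c : Nat) : Int) + (sN : Int)) 1).map
        (fun j => PySem.List.pyGetD row j "") := by
  rw [PySem.List.pyRange_zero_nat, PySem.List.pyRange_one, List.map_map, List.map_map]
  have hcnt : (((c : Int) + sN - c).toNat) = sN := by omega
  rw [hcnt]
  rfl

-- band[0] of a nonempty band built over range(0, s)
lemma pv_pyGetD_map_pyRange_zero {α : Type} (f : Int → α) {sN : Nat} (h : 0 < sN) (d : α) :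
    PySem.List.pyGetD ((PySem.List.pyRange 0 (sN : Int) 1).map f) 0 d = f 0 := by
  rw [PySem.List.pyRange_zero_nat, List.map_map, PySem.List.pyGetD_zero,
      List.getD_eq_getElem _ _ (by simpa using h)]
  simp

theorem break_into_subimages_spec : Claim_equal_break_into_subimages := by
  intro image hdom hpre
  obtain ⟨hne, hmod, hrows⟩ := hpre
  unfold Spec_break_into_subimages
  simp only [break_into_subimages, break_into_subimages_alt,
    PySem.List.foldl_append_singleton_eq_map, PySem.List.foldl_append_eq_flatMap,
    List.nil_append]
  have h0 : PySem.List.pyGetD image 0 [] = image.headD [] := by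
    cases image with
    | nil => exact absurd rfl hne
    | cons a l => simp [PySem.List.pyGetD_zero_cons]
  set L : Nat := (image.headD []).length with hL
  set sN : Nat := if L % 2 = 0 then 2 else 3 with hsN
  have hs : 0 < sN := by rw [hsN]; split_ifs <;> norm_num
  have hsub : (if PySem.Int.mod (((PySem.List.pyGetD image 0 []).length : Nat) : Int) 2 = 0 then (2:Int) else 3) = ((sN : Nat) : Int) := by
    rw [h0, PySem.Int.mod_eq_emod_of_pos (by norm_num), hsN]
    split_ifs with h1 h2 h2 <;> try rfl
    · exact absurd (by omega : L % 2 = 0) h2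
    · exact absurd (by omega : ((L:Int)) % 2 = 0) h1
  simp only [hsub]
  set n : Nat := image.length with hn
  have hdvd : sN ∣ n := Nat.dvd_of_mod_eq_zero hmod
  have hms : n / sN * sN = n := Nat.div_mul_cancel hdvd
  rw [pv_range_step n sN hs hdvd]
  simp only [List.flatMap_map, List.map_map, Function.comp_def]
  apply List.flatMap_congr
  intro i hi
  simp only [List.mem_range] at hi
  have hin : i * sN + sN ≤ n := by
    calc i * sN + sN = (i + 1) * sN := by ring
      _ ≤ n / sN * sN := Nat.mul_le_mul_right sN hi
      _ = n := hms
  rw [pv_pyGetD_map_pyRange_zero _ hs]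
  simp only [add_zero]
  rw [PySem.List.pyGetD_natCast _ (i * sN) ([] : List (List String)),
      List.getD_eq_getElem _ ([] : List (List String))
        (show i * sN < (image.map (fun row => (List.range (n / sN)).map (fun j => (PySem.List.pyRange 0 (sN : Int) 1).map (fun o => PySem.List.pyGetD row (((j * sN : Nat) : Int) + o) "")))).length by simp; omega),
      List.getElem_map]
  simp only [List.length_map, List.length_range]
  rw [PySem.List.pyRange_zero_nat (n / sN)]
  simp only [List.map_map, Function.comp_def]
  apply List.map_congr_left
  intro k hk
  simp only [List.mem_range] at hk
  apply List.ext_getElem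
  · simp [PySem.List.length_pyRange_one]
  · intro t h1 h2
    simp only [PySem.List.length_pyRange_one, List.length_map] at h2
    simp only [List.getElem_map, PySem.List.getElem_pyRange_one, zero_add]
    have ht : t < sN := by omega
    have hidx : i * sN + t < n := by omega
    have hc : ((i * sN : Nat) : Int) + (t : Int) = ((i * sN + t : Nat) : Int) := by push_cast; ring
    rw [hc]
    simp only [PySem.List.pyGetD_natCast]
    rw [List.getD_eq_getElem image [] (show i * sN + t < image.length by omega),
        List.getD_eq_getElem _ ([] : List (List String))
          (show i * sN + t < (image.map (fun row => (List.range (n / sN)).map (fun j => (PySem.List.pyRange 0 (sN : Int) 1).map (fun o => PySem.List.pyGetD row (((j * sN : Nat) : Int) + o) "")))).length by simp; omega),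
        List.getElem_map,
        List.getD_eq_getElem _ ([] : List String)
          (show k < ((List.range (n / sN)).map (fun j => (PySem.List.pyRange 0 (sN : Int) 1).map
            (fun o => PySem.List.pyGetD (image[i * sN + t]'(by omega)) (((j * sN : Nat) : Int) + o) ""))).length
            by simpa using hk),
        List.getElem_map, List.getElem_range]
    rw [pv_chunk_shift _ (k * sN) sN]
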